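-- pv_equiv track=rewrite | github.com/pypi-data/pypi-mirror-397 | packages/papermc-plugin-manager/papermc_plugin_manager-0.1.1-py3-none-any.whl/papermc_plugin_manager/console.py | compute_compatibility_score
-- ===== SOURCE A (Python) =====
-- def compute_compatibility_score(supported_versions: list[str], current_version: str | None) -> int:
--     # Parse game version into parts
--
--     if current_version and supported_versions:
--         game_parts = current_version.split(".")
--
--         # Check each supported version for best match
--         best_match = 0  # 0 = no match, 2 = two digits, 3 = three digits
--         for mc_version in supported_versions:
--             mc_parts = mc_version.split(".")
--
--             # Check for three-digit match
--             if len(game_parts) >= 3 and len(mc_parts) >= 3 and game_parts[:3] == mc_parts[:3]: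
--                 best_match = 3
--                 break
--
--             # Check for two-digit match
--             if len(game_parts) >= 2 and len(mc_parts) >= 2 and game_parts[:2] == mc_parts[:2]:
--                 best_match = max(best_match, 2)
--         return best_match
--     return -1
-- ===== SOURCE B (Python) =====
-- def compute_compatibility_score(supported_versions: list[str], current_version: str | None) -> int:
--     if not (current_version and supported_versions):
--         return -1
--     game_parts = current_version.split(".")
--     if len(game_parts) >= 3 and any(v.split(".")[:3] == game_parts[:3] for v in supported_versions):
--         return 3
--     if len(game_parts) >= 2 and any(v.split(".")[:2] == game_parts[:2] for v in supported_versions):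
--         return 2
--     return 0
-- ===== Notes on version B (the rewrite author's own statement) =====
-- stated objective: simpler
-- what changed: Replaces the stateful best-match loop (accumulator, max, break) by two closed-form existence checks — first for a three-part prefix match, then for a two-part one — exploiting that the result is order-independent; slicing makes the explicit length guards on each supported version unnecessary.
import Mathlib
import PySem

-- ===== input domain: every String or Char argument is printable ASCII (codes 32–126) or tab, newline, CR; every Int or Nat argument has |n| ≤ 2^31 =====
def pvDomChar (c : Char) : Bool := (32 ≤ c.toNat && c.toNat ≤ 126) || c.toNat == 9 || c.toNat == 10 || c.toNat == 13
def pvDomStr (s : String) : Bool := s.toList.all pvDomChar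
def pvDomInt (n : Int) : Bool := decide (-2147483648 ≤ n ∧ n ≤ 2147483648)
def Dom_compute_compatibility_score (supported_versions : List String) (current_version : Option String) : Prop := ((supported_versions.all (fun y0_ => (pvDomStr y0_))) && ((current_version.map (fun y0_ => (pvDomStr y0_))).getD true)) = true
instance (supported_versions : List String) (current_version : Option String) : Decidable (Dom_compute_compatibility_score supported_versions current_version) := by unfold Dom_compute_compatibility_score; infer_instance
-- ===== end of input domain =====

-- B replaces A's stateful best-match loop (with break and max) by two closed-form existence
-- checks (three-part match, else two-part match): simpler, same asymptotic cost, same values.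


-- ===== PORT A =====
-- s.split(".") ; the separator is the non-empty literal ".", so split? is always `some`
def pvSplitDot (s : String) : List String := (PySem.Str.split? s ".").getD []

-- the for-loop over supported_versions: state = best_match, `break` = early return of 3
def pvALoop (game_parts : List String) : List String → Int → Int
  | [], best_match => best_match
  | mc_version :: rest, best_match =>
    let mc_parts := pvSplitDot mc_version
    if game_parts.length ≥ 3 ∧ mc_parts.length ≥ 3 ∧ game_parts.take 3 = mc_parts.take 3 then
      3
    else if game_parts.length ≥ 2 ∧ mc_parts.length ≥ 2 ∧ game_parts.take 2 = mc_parts.take 2 then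
      pvALoop game_parts rest (max best_match 2)
    else
      pvALoop game_parts rest best_match

def compute_compatibility_score (supported_versions : List String) (current_version : Option String) : Int :=
  match current_version with
  | some s =>
    if s ≠ "" ∧ supported_versions ≠ [] then
      pvALoop (pvSplitDot s) supported_versions 0
    else -1
  | none => -1

-- ===== PORT B =====
def compute_compatibility_score_alt (supported_versions : List String) (current_version : Option String) : Int :=
  match current_version with
  | some s =>
    if s = "" ∨ supported_versions = [] then -1
    else
      let game_parts := pvSplitDot s
      if game_parts.length ≥ 3 ∧ supported_versions.any (fun v => (pvSplitDot v).take 3 = game_parts.take 3) then 3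
      else if game_parts.length ≥ 2 ∧ supported_versions.any (fun v => (pvSplitDot v).take 2 = game_parts.take 2) then 2
      else 0
  | none => -1

-- ===== PRECONDITION & SPEC =====
def Spec_compute_compatibility_score (supported_versions : List String) (current_version : Option String) (out : Int) : Prop := out = compute_compatibility_score_alt supported_versions current_version
instance (supported_versions : List String) (current_version : Option String) (out : Int) : Decidable (Spec_compute_compatibility_score supported_versions current_version out) := by unfold Spec_compute_compatibility_score; infer_instance

-- ===== CLAIM (what is proved, stated in full; the proofs are below) =====
def Claim_equal_compute_compatibility_score : Prop := ∀ (supported_versions : List String) (current_version : Option String), Dom_compute_compatibility_score supported_versions current_version → Spec_compute_compatibility_score supported_versions current_version (compute_compatibility_score supported_versions current_version)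

-- ===== LEMMAS AND PROOFS =====

-- a take-k equality with a list of length ≥ k forces the other length ≥ k
theorem pv_take_len {α : Type} (k : ℕ) (xs ys : List α) (hx : xs.length ≥ k)
    (h : ys.take k = xs.take k) : ys.length ≥ k := by
  have := congrArg List.length h
  simp [List.length_take] at this
  omega

-- characterisation of A's loop for best_match ∈ {0, 2}, in Prop form
theorem pvALoop_eq (gp : List String) (l : List String) (b : Int) (hb : b = 0 ∨ b = 2) :
    pvALoop gp l b =
      if gp.length ≥ 3 ∧ ∃ v ∈ l, (pvSplitDot v).take 3 = gp.take 3 then 3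
      else if b = 2 ∨ (gp.length ≥ 2 ∧ ∃ v ∈ l, (pvSplitDot v).take 2 = gp.take 2) then 2
      else 0 := by
  induction l generalizing b with
  | nil =>
    simp [pvALoop]
    rcases hb with h | h <;> simp [h]
  | cons v rest ih =>
    simp only [pvALoop]
    by_cases h3 : gp.length ≥ 3 ∧ (pvSplitDot v).length ≥ 3 ∧ gp.take 3 = (pvSplitDot v).take 3
    · rw [if_pos h3, if_pos ⟨h3.1, v, List.mem_cons_self .., h3.2.2.symm⟩]
    · rw [if_neg h3]
      have hv3 : ¬ ((pvSplitDot v).take 3 = gp.take 3 ∧ gp.length ≥ 3) := by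
        rintro ⟨he, hl⟩
        exact h3 ⟨hl, pv_take_len 3 gp (pvSplitDot v) hl he, he.symm⟩
      have hE3 : (gp.length ≥ 3 ∧ ∃ w ∈ v :: rest, (pvSplitDot w).take 3 = gp.take 3)
          ↔ (gp.length ≥ 3 ∧ ∃ w ∈ rest, (pvSplitDot w).take 3 = gp.take 3) := by
        constructor
        · rintro ⟨hl, w, hw, he⟩
          rcases List.mem_cons.mp hw with rfl | hw
          · exact absurd ⟨he, hl⟩ hv3
          · exact ⟨hl, w, hw, he⟩
        · rintro ⟨hl, w, hw, he⟩
          exact ⟨hl, w, List.mem_cons_of_mem _ hw, he⟩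
      by_cases h2 : gp.length ≥ 2 ∧ (pvSplitDot v).length ≥ 2 ∧ gp.take 2 = (pvSplitDot v).take 2
      · rw [if_pos h2, ih (max b 2) (by rcases hb with h | h <;> simp [h])]
        have hmax : max b 2 = 2 := by rcases hb with h | h <;> simp [h]
        by_cases hE : gp.length ≥ 3 ∧ ∃ w ∈ rest, (pvSplitDot w).take 3 = gp.take 3
        · rw [if_pos hE, if_pos (hE3.mpr hE)]
        · rw [if_neg hE, if_neg (fun h => hE (hE3.mp h)),
            if_pos (Or.inl hmax),
            if_pos (Or.inr ⟨h2.1, v, List.mem_cons_self .., h2.2.2.symm⟩)]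
      · rw [if_neg h2, ih b hb]
        have hv2 : ¬ ((pvSplitDot v).take 2 = gp.take 2 ∧ gp.length ≥ 2) := by
          rintro ⟨he, hl⟩
          exact h2 ⟨hl, pv_take_len 2 gp (pvSplitDot v) hl he, he.symm⟩
        have hE2 : (b = 2 ∨ gp.length ≥ 2 ∧ ∃ w ∈ v :: rest, (pvSplitDot w).take 2 = gp.take 2)
            ↔ (b = 2 ∨ gp.length ≥ 2 ∧ ∃ w ∈ rest, (pvSplitDot w).take 2 = gp.take 2) := by
          constructor
          · rintro (h | ⟨hl, w, hw, he⟩)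
            · exact Or.inl h
            rcases List.mem_cons.mp hw with rfl | hw
            · exact absurd ⟨he, hl⟩ hv2
            · exact Or.inr ⟨hl, w, hw, he⟩
          · rintro (h | ⟨hl, w, hw, he⟩)
            · exact Or.inl h
            · exact Or.inr ⟨hl, w, List.mem_cons_of_mem _ hw, he⟩
        rw [if_congr hE3 rfl (if_congr hE2 rfl rfl)]

-- ===== VERDICT (by name: the statement is the Claim_ definition above) =====
theorem compute_compatibility_score_spec : Claim_equal_compute_compatibility_score := by
  intro svs cv _
  unfold Spec_compute_compatibility_score compute_compatibility_score compute_compatibility_score_alt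
  cases cv with
  | none => rfl
  | some s =>
    simp only []
    by_cases hg : s = "" ∨ svs = []
    · rw [if_pos hg, if_neg (by tauto)]
    · rw [if_neg hg, if_pos (by tauto)]
      rw [pvALoop_eq (pvSplitDot s) svs 0 (Or.inl rfl)]
      simp [List.any_eq_true]
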